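-- pv_equiv track=rewrite | github.com/DuncanSmith147/RP4 | analyze.py | _f
-- ===== SOURCE A (Python) =====
-- def _f(lis1, lis2):
--     # lis1 and lis2 are sorted lists of
--     # objects that support comparison
--     # returns the nodes (with non-zero outdegree)
--     # and the degrees of
--     # the bipartite graph with an edge from
--     # each node, v, in lis1 to each node, w,
--     # in lis2 s.t. v < w
--     it1 = iter(lis1)
--     it2 = enumerate(lis2)
--     nodes = []
--     degrees = []
--     v = next(it1)
--     j, w = next(it2)
--     try:
--         while True:
--             if v < w:
--                 nodes.append(v)
--                 degrees.append(len(lis2) - j)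
--                 v = next(it1)
--             else:
--                 j, w = next(it2)
--     except StopIteration:
--         pass
--     return nodes, degrees
-- ===== SOURCE B (Python) =====
-- def _f(lis1, lis2):
--     # The positions of lis2, once passed, stay passed: v reaches exactly the
--     # elements of lis2 beyond the first one exceeding the largest node seen so
--     # far.  So compute that running maximum and, for each v, find that first
--     # position independently; record v only when its outdegree is non-zero.
--     n = len(lis2)
--     nodes = []
--     degrees = []
--     m = None
--     for v in lis1:
--         if m is None or v > m:
--             m = v
--         j = next((i for i, w in enumerate(lis2) if w > m), n)
--         if j < n:
--             nodes.append(v)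
--             degrees.append(n - j)
--     return nodes, degrees
-- ===== Notes on version B (the rewrite author's own statement) =====
-- stated objective: alternative
-- what changed: Replaces A's single two-pointer merge over primed iterators by a per-element formulation: a running maximum of lis1 plus, for each element, an independent generator scan of lis2 for the first element exceeding it, appending only non-zero degrees; Pre_ excludes only the empty lists, on which A raises StopIteration.
import Mathlib
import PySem

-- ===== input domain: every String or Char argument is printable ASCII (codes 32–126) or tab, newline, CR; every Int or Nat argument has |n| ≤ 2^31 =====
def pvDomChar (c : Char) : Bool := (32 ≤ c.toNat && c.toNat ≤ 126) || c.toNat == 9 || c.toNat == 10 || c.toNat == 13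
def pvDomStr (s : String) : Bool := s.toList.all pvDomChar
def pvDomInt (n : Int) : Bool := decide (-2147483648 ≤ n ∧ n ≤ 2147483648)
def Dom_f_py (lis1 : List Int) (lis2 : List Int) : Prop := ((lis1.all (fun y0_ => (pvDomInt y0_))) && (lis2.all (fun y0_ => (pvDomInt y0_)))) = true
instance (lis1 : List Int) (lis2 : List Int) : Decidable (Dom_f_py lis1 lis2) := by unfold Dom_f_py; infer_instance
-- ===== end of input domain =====

-- B replaces A's single two-pointer merge over primed iterators by a per-element formulation:
-- a running maximum of lis1 plus an independent scan of lis2 for each element (alternative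
-- decomposition, not faster); empty inputs, on which A raises StopIteration, are excluded by Pre_.

-- ===== PORT A =====
-- Python's enumerate(lis2) starting at index j (exact: produces (index, element) pairs in order).
def pyEnumFrom (j : Nat) : List Int → List (Nat × Int)
  | [] => []
  | a :: t => (j, a) :: pyEnumFrom (j + 1) t

-- The while-True loop of A: state = (rest of it1 with current v first, rest of it2, nodes, degrees);
-- a StopIteration from next(...) inside the try ends the loop and returns (nodes, degrees).
def f_pyLoop (n : Nat) : List Int → List (Nat × Int) → List Int → List Int → List Int × List Int
  | [], _, nodes, degrees => (nodes, degrees)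
  | _ :: _, [], nodes, degrees => (nodes, degrees)
  | v :: vs, (j, w) :: rest, nodes, degrees =>
    if v < w then
      f_pyLoop n vs ((j, w) :: rest) (nodes ++ [v]) (degrees ++ [(n : Int) - (j : Int)])
    else
      f_pyLoop n (v :: vs) rest nodes degrees
  termination_by l1 l2 _ _ => l1.length + l2.length
  decreasing_by all_goals simp only [List.length_cons]; omega

-- On an empty lis1 or lis2 the Python raises StopIteration (excluded by Pre_); the port falls through to empty results there.
def f_py (lis1 : List Int) (lis2 : List Int) : List Int × List Int :=
  f_pyLoop lis2.length lis1 (pyEnumFrom 0 lis2) [] []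

-- ===== PORT B =====
-- Source B's `next((i for i, w in enumerate(lis2) if w > m), n)`: the index of the first element
-- exceeding m, or len(lis2) when there is none (exact: the generator scans lis2 in order).
def nextIdx (m : Int) : List Int → Nat
  | [] => 0
  | w :: t => if w > m then 0 else nextIdx m t + 1

-- Source B's for-loop over lis1: state = (m, nodes, degrees), m the running maximum (None-initialised).
def f_py_alt (lis1 : List Int) (lis2 : List Int) : List Int × List Int :=
  let n := lis2.length
  let r := lis1.foldl (fun (st : Option Int × List Int × List Int) v =>
    let m := match st.1 with | none => v | some mv => if v > mv then v else mv
    let j := nextIdx m lis2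
    if j < n then (some m, st.2.1 ++ [v], st.2.2 ++ [(n : Int) - (j : Int)])
    else (some m, st.2.1, st.2.2))
    (none, [], [])
  (r.2.1, r.2.2)

-- ===== PRECONDITION & SPEC =====
-- Pre_ excludes exactly the empty lists: the priming next() calls of A sit outside its try, so A
-- raises StopIteration when lis1 or lis2 is empty.
def Pre_f_py (lis1 : List Int) (lis2 : List Int) : Prop := lis1 ≠ [] ∧ lis2 ≠ []
instance (lis1 : List Int) (lis2 : List Int) : Decidable (Pre_f_py lis1 lis2) := by unfold Pre_f_py; infer_instance

def pvWitness_f_py : List Int × List Int := ([1, 3], [2, 4])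

def Spec_f_py (lis1 : List Int) (lis2 : List Int) (out : List Int × List Int) : Prop := out = f_py_alt lis1 lis2
instance (lis1 : List Int) (lis2 : List Int) (out : List Int × List Int) : Decidable (Spec_f_py lis1 lis2 out) := by unfold Spec_f_py; infer_instance

-- ===== CLAIM (what is proved, stated in full; the proofs are below) =====
def Claim_equal_f_py : Prop := ∀ (lis1 : List Int) (lis2 : List Int), Dom_f_py lis1 lis2 → Pre_f_py lis1 lis2 → Spec_f_py lis1 lis2 (f_py lis1 lis2)

-- ===== LEMMAS AND PROOFS =====

-- Python's `v if m is None or v > m else m`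
def mxO : Option Int → Int → Int
  | none, v => v
  | some m, v => if v > m then v else m

-- first index of l2 holding an element > m (l2.length if none)
def fidx (l2 : List Int) (m : Int) : Nat := (l2.takeWhile (fun w => decide (w ≤ m))).length

-- the common result: walk lis1 keeping the running max M; emit (v, n - fidx) when fidx < n
def goodR (l2 : List Int) : List Int → Option Int → List (Int × Int)
  | [], _ => []
  | v :: vs, M =>
    if fidx l2 (mxO M v) < l2.length then
      (v, (l2.length : Int) - (fidx l2 (mxO M v) : Int)) :: goodR l2 vs (some (mxO M v))
    else goodR l2 vs (some (mxO M v))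

theorem mxO_ge_v (M : Option Int) (v : Int) : v ≤ mxO M v := by
  cases M with
  | none => simp [mxO]
  | some m => simp only [mxO]; split <;> omega

theorem mxO_ge_m (m v : Int) : m ≤ mxO (some m) v := by
  simp only [mxO]; split <;> omega

-- ---- fidx facts ----

theorem fidx_self (l : List Int) (m : Int) (h : fidx l m < l.length) :
    m < l.getD (fidx l m) 0 := by
  induction l with
  | nil => simp [fidx] at h
  | cons a t ih =>
    by_cases ha : a ≤ m
    · have hrw : fidx (a :: t) m = fidx t m + 1 := by
        simp [fidx, ha]
      rw [hrw]
      rw [hrw] at h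
      simpa using ih (by simpa using Nat.lt_of_succ_lt_succ h)
    · have hrw : fidx (a :: t) m = 0 := by simp [fidx, ha]
      rw [hrw]
      simpa using not_le.mp ha

theorem fidx_eq_of (l : List Int) (m : Int) : ∀ (j : Nat),
    (∀ i, i < j → l.getD i 0 ≤ m) → j < l.length → m < l.getD j 0 → fidx l m = j := by
  induction l with
  | nil => intro j _ hj _; simp at hj
  | cons a t ih =>
    intro j hlo hj hself
    cases j with
    | zero =>
      have : ¬ a ≤ m := not_le.mpr (by simpa using hself)
      simp [fidx, this]
    | succ j' =>
      have ha : a ≤ m := by simpa using hlo 0 (Nat.succ_pos _)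
      have ht : fidx t m = j' := by
        apply ih j' (fun i hi => by simpa using hlo (i + 1) (Nat.succ_lt_succ hi))
          (by simpa using hj) (by simpa using hself)
      simp [fidx, ha]
      simpa [fidx] using ht

theorem fidx_eq_length_of (l : List Int) (m : Int)
    (h : ∀ i, i < l.length → l.getD i 0 ≤ m) : fidx l m = l.length := by
  induction l with
  | nil => simp [fidx]
  | cons a t ih =>
    have ha : a ≤ m := by simpa using h 0 (Nat.succ_pos _)
    have ht : fidx t m = t.length :=
      ih (fun i hi => by simpa using h (i + 1) (Nat.succ_lt_succ hi))
    simp [fidx, ha]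
    simpa [fidx] using ht

-- B's scan computes fidx
theorem nextIdx_eq_fidx (m : Int) (l : List Int) : nextIdx m l = fidx l m := by
  induction l with
  | nil => rfl
  | cons w t ih =>
    by_cases hw : w > m
    · simp [nextIdx, fidx, hw, not_le.mpr hw]
    · simp only [nextIdx, if_neg hw]
      simp [fidx, not_lt.mp hw]
      simpa [fidx] using ih

-- ---- goodR facts ----

theorem goodR_all_le (l2 : List Int) : ∀ (vs : List Int) (m : Int),
    (∀ i, i < l2.length → l2.getD i 0 ≤ m) → goodR l2 vs (some m) = [] := by
  intro vs
  induction vs with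
  | nil => intro m _; rfl
  | cons v t ih =>
    intro m hall
    have hm' : ∀ i, i < l2.length → l2.getD i 0 ≤ mxO (some m) v :=
      fun i hi => le_trans (hall i hi) (mxO_ge_m m v)
    have hfx : fidx l2 (mxO (some m) v) = l2.length := fidx_eq_length_of l2 _ hm'
    rw [goodR, if_neg (by rw [hfx]; exact lt_irrefl _)]
    exact ih _ hm'

-- A's loop computes goodR: invariant (a) every index below j holds a value ≤ max(M, current v);
-- (d) if the current v is below the running max m, then j is exactly fidx l2 m.
theorem loopA (l2 : List Int) (vlist tail : List Int) (j : Nat) (M : Option Int)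
    (nodes degrees : List Int)
    (ht : tail = l2.drop j)
    (hinvA : ∀ v', vlist.head? = some v' → ∀ i, i < j → l2.getD i 0 ≤ mxO M v')
    (hinvD : ∀ v' m, vlist.head? = some v' → M = some m → v' < m → fidx l2 m = j) :
    f_pyLoop l2.length vlist (pyEnumFrom j tail) nodes degrees
      = (nodes ++ (goodR l2 vlist M).map Prod.fst, degrees ++ (goodR l2 vlist M).map Prod.snd) := by
  match vlist, tail with
  | [], _ => simp [f_pyLoop, goodR]
  | v :: vs, [] =>
    have hjL : l2.length ≤ j := by
      have := congrArg List.length ht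
      simp [List.length_drop] at this
      omega
    have hall : ∀ i, i < l2.length → l2.getD i 0 ≤ mxO M v :=
      fun i hi => hinvA v rfl i (by omega)
    have hfx : fidx l2 (mxO M v) = l2.length := fidx_eq_length_of l2 _ hall
    have hg : goodR l2 (v :: vs) M = [] := by
      rw [goodR, if_neg (by rw [hfx]; exact lt_irrefl _)]
      exact goodR_all_le l2 vs _ hall
    simp [pyEnumFrom, f_pyLoop, hg]
  | v :: vs, w :: rest =>
    have hlen : l2.length - j = rest.length + 1 := by
      have h := congrArg List.length ht
      simp [List.length_drop] at h
      omega
    have hjL : j < l2.length := by omega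
    have hgw : l2.getD j 0 = w := by
      have h0 : l2[j]? = some w := by
        have hd : (l2.drop j)[0]? = l2[j + 0]? := List.getElem?_drop
        rw [← ht] at hd
        simpa using hd.symm
      simp [List.getD_eq_getElem?_getD, h0]
    have hdrop : l2.drop (j + 1) = rest := by
      have : l2.drop (j + 1) = (l2.drop j).drop 1 := by rw [List.drop_drop]
      rw [this, ← ht]; rfl
    by_cases hvw : v < w
    · -- A emits v here; show fidx l2 (mxO M v) = j
      have hfx : fidx l2 (mxO M v) = j := by
        apply fidx_eq_of l2 _ j (fun i hi => hinvA v rfl i hi) hjL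
        rw [hgw]
        cases M with
        | none => simpa [mxO] using hvw
        | some m =>
          by_cases hvm : v > m
          · simpa [mxO, hvm] using hvw
          · by_cases hvm2 : v < m
            · have hj' : fidx l2 m = j := hinvD v m rfl rfl hvm2
              have := fidx_self l2 m (by omega)
              rw [hj', hgw] at this
              simpa [mxO, hvm] using this
            · have : v = m := by omega
              subst this
              simpa [mxO, hvm] using hvw
      have hrec := loopA l2 vs (w :: rest) j (some (mxO M v)) (nodes ++ [v])
          (degrees ++ [(l2.length : Int) - (j : Int)]) ht
          (fun v₂ hv₂ i hi => le_trans (hinvA v rfl i hi) (mxO_ge_m _ v₂))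
          (fun v₂ m hv₂ hm _ => by injection hm with hm; rw [← hm]; exact hfx)
      rw [pyEnumFrom] at hrec ⊢
      rw [f_pyLoop, if_pos hvw, hrec]
      have hg : goodR l2 (v :: vs) M
          = (v, (l2.length : Int) - (j : Int)) :: goodR l2 vs (some (mxO M v)) := by
        rw [goodR, if_pos (by rw [hfx]; exact hjL), hfx]
      rw [hg]
      simp
    · -- A advances j; the case v < m (M = some m) is impossible here
      have hwv : w ≤ v := not_lt.mp hvw
      have hnvm : ∀ m, M = some m → ¬ v < m := by
        intro m hm hvm
        have hj' : fidx l2 m = j := hinvD v m rfl hm hvm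
        have := fidx_self l2 m (by omega)
        rw [hj', hgw] at this
        omega
      have hrec := loopA l2 (v :: vs) rest (j + 1) M nodes degrees hdrop.symm
          (fun v₂ hv₂ i hi => by
            have hv : v₂ = v := by simpa using hv₂.symm
            subst hv
            by_cases hij : i < j
            · exact hinvA v₂ rfl i hij
            · have : i = j := by omega
              subst this
              rw [hgw]
              exact le_trans hwv (mxO_ge_v M v₂))
          (fun v₂ m hv₂ hm hvm => by
            have hv : v₂ = v := by simpa using hv₂.symm
            subst hv
            exact absurd hvm (hnvm m hm))
      rw [pyEnumFrom]
      rw [f_pyLoop, if_neg hvw, hrec]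
  termination_by vlist.length + tail.length
  decreasing_by all_goals simp only [List.length_cons]; omega

-- B's fold computes goodR
theorem foldB (l2 : List Int) (l1 : List Int) :
    ∀ (M : Option Int) (a b : List Int),
    (l1.foldl (fun (st : Option Int × List Int × List Int) v =>
      let m := match st.1 with | none => v | some mv => if v > mv then v else mv
      let j := nextIdx m l2
      if j < l2.length then (some m, st.2.1 ++ [v], st.2.2 ++ [(l2.length : Int) - (j : Int)])
      else (some m, st.2.1, st.2.2))
      (M, a, b)).2
    = (a ++ (goodR l2 l1 M).map Prod.fst, b ++ (goodR l2 l1 M).map Prod.snd) := by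
  induction l1 with
  | nil => intro M a b; simp [goodR]
  | cons v t ih =>
    intro M a b
    rw [List.foldl_cons]
    have hM : (match M with | none => v | some m => if v > m then v else m) = mxO M v := by
      cases M <;> rfl
    have hj : nextIdx (mxO M v) l2 = fidx l2 (mxO M v) := nextIdx_eq_fidx _ _
    by_cases hlt : fidx l2 (mxO M v) < l2.length
    · simp only [hM, hj, hlt, ite_true]
      rw [ih]
      have hg : goodR l2 (v :: t) M
          = (v, (l2.length : Int) - (fidx l2 (mxO M v) : Int)) :: goodR l2 t (some (mxO M v)) := by
        rw [goodR, if_pos hlt]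
      rw [hg]
      simp
    · simp only [hM, hj, hlt, ite_false]
      rw [ih]
      have hg : goodR l2 (v :: t) M = goodR l2 t (some (mxO M v)) := by
        rw [goodR, if_neg hlt]
      rw [hg]

-- ===== VERDICT (by name: the statement is the Claim_ definition above) =====
theorem f_py_spec : Claim_equal_f_py := by
  intro lis1 lis2 _ _
  unfold Spec_f_py f_py f_py_alt
  rw [loopA lis2 lis1 lis2 0 none [] [] (by simp)
      (by intro v' _ i hi; omega) (by intro v' m _ hm _; cases hm)]
  simp only []
  rw [foldB lis2 lis1 none [] []]
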